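-- pv_equiv track=rewrite | github.com/ntxuan25174600072-cute/THCS_19A2 | 51_NguyenThiXuan_THCS/Bai15.py | xu_ly_tuple_toi_gian
-- ===== SOURCE A (Python) =====
-- def xu_ly_tuple_toi_gian(T):
--     l1, l2 = [], []
--     so_chan, so_le = 0, 0
--
--     for so in T:
--         if so % 2 == 0:
--             l1.append(so)
--             so_chan = so_chan + so
--         else:
--             l2.append(so)
--             so_le = so_le + so
--     tc = tuple(l1)
--     tl = tuple(l2)
--     return tc, so_chan, tl, so_le
-- ===== SOURCE B (Python) =====
-- def xu_ly_tuple_toi_gian(T):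
--     tc = tuple(x for x in T if x % 2 == 0)
--     tl = tuple(x for x in T if x % 2 != 0)
--     return tc, sum(tc), tl, sum(tl)
-- ===== Notes on version B (the rewrite author's own statement) =====
-- stated objective: simpler
-- what changed: Replaces the single interleaved loop with four running accumulators by a filter-then-reduce decomposition: two filtered comprehensions build the partitions and sum() reduces each separately.
import Mathlib
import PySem

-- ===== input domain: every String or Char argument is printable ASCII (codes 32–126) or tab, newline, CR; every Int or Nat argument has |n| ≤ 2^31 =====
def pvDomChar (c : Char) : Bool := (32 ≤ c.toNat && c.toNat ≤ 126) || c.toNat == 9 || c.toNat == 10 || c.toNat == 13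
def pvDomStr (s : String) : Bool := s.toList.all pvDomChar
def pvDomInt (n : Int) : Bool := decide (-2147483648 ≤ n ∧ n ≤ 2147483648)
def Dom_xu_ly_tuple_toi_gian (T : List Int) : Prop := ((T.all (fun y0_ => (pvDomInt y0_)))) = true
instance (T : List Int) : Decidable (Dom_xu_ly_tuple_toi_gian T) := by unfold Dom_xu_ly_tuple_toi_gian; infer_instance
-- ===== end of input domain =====

-- B replaces A's single accumulating loop by filter-then-reduce (two filters, two sums); objective: simpler.


-- ===== PORT A =====
-- one pass maintaining both partition lists and both running sums
def xu_ly_tuple_toi_gian (T : List Int) : List Int × Int × List Int × Int :=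
  let st := T.foldl
    (fun (st : List Int × Int × List Int × Int) so =>
      let (l1, so_chan, l2, so_le) := st
      if PySem.Int.mod so 2 = 0 then (l1 ++ [so], so_chan + so, l2, so_le)
      else (l1, so_chan, l2 ++ [so], so_le + so))
    ([], 0, [], 0)
  (st.1, st.2.1, st.2.2.1, st.2.2.2)

-- ===== PORT B =====
-- filter-then-reduce: build each partition by filtering, sum it separately
def xu_ly_tuple_toi_gian_alt (T : List Int) : List Int × Int × List Int × Int :=
  let tc := T.filter (fun x => PySem.Int.mod x 2 == 0)
  let tl := T.filter (fun x => !(PySem.Int.mod x 2 == 0))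
  (tc, tc.sum, tl, tl.sum)

-- ===== PRECONDITION & SPEC =====
def Spec_xu_ly_tuple_toi_gian (T : List Int) (out : List Int × Int × List Int × Int) : Prop := out = xu_ly_tuple_toi_gian_alt T
instance (T : List Int) (out : List Int × Int × List Int × Int) : Decidable (Spec_xu_ly_tuple_toi_gian T out) := by unfold Spec_xu_ly_tuple_toi_gian; infer_instance

-- ===== CLAIM (what is proved, stated in full; the proofs are below) =====
def Claim_equal_xu_ly_tuple_toi_gian : Prop := ∀ (T : List Int), Dom_xu_ly_tuple_toi_gian T → Spec_xu_ly_tuple_toi_gian T (xu_ly_tuple_toi_gian T)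

-- ===== LEMMAS AND PROOFS =====
theorem xu_ly_fold_inv (T : List Int) (l1 l2 : List Int) (sc sl : Int) :
    T.foldl
      (fun (st : List Int × Int × List Int × Int) so =>
        let (l1, so_chan, l2, so_le) := st
        if PySem.Int.mod so 2 = 0 then (l1 ++ [so], so_chan + so, l2, so_le)
        else (l1, so_chan, l2 ++ [so], so_le + so))
      (l1, sc, l2, sl)
    = (l1 ++ T.filter (fun x => PySem.Int.mod x 2 == 0),
       sc + (T.filter (fun x => PySem.Int.mod x 2 == 0)).sum,
       l2 ++ T.filter (fun x => !(PySem.Int.mod x 2 == 0)),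
       sl + (T.filter (fun x => !(PySem.Int.mod x 2 == 0))).sum) := by
  induction T generalizing l1 l2 sc sl with
  | nil => simp
  | cons a t ih =>
    by_cases h : PySem.Int.mod a 2 = 0
    · simp only [List.foldl_cons, List.filter_cons, h, beq_iff_eq, ih]
      simp [List.append_assoc, add_assoc]
    · have h1 : a % 2 = 1 := by
        have := PySem.Int.mod_eq_emod_of_pos (a := a) (b := 2) (by norm_num)
        omega
      simp only [List.foldl_cons, List.filter_cons, h, beq_iff_eq, ih]
      simp [List.append_assoc, add_assoc, h1]

-- ===== VERDICT (by name: the statement is the Claim_ definition above) =====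
theorem xu_ly_tuple_toi_gian_spec : Claim_equal_xu_ly_tuple_toi_gian := by
  intro T _
  show xu_ly_tuple_toi_gian T = xu_ly_tuple_toi_gian_alt T
  unfold xu_ly_tuple_toi_gian xu_ly_tuple_toi_gian_alt
  rw [xu_ly_fold_inv]
  simp
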